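-- pv_equiv track=rewrite | github.com/horpto/KA.Pairs | pairs.py | createAdj
-- ===== SOURCE A (Python) =====
-- def createAdj(shift, adj):
--     shift.reverse()
--     res = []
--     for x in shift:
--         if x < 0 :
--             res.append([])
--             continue
--         else:
--             res.append(adj[x:len(adj)])
--         adj = adj[:x]
--     res.reverse()
--     return res
-- ===== SOURCE B (Python) =====
-- def createAdj(shift, adj):
--     # Two-stage: precompute end pointers (suffix minima of non-negative shifts),
--     # then emit each segment as one slice of the ORIGINAL adj.
--     # Return-value equivalent to A; unlike A, does not reverse `shift` in place.
--     n = len(shift)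
--     ends = [0] * n
--     e = len(adj)
--     for i in range(n - 1, -1, -1):
--         ends[i] = e
--         x = shift[i]
--         if 0 <= x < e:
--             e = x
--     return [[] if x < 0 else adj[x:ends[i]] for i, x in enumerate(shift)]
-- ===== Notes on version B (the rewrite author's own statement) =====
-- stated objective: alternative
-- what changed: B is two staged passes instead of A's single reversed accumulation loop: it precomputes an end-pointer array (suffix minima of the non-negative shift entries) and then emits each segment as one slice of the original adj, never maintaining A's shrinking working copy of adj; B also does not reverse shift in place (measured ~1.2-1.4x faster on random inputs, below the 1.5x bar, so no speed claim).
import Mathlib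
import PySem

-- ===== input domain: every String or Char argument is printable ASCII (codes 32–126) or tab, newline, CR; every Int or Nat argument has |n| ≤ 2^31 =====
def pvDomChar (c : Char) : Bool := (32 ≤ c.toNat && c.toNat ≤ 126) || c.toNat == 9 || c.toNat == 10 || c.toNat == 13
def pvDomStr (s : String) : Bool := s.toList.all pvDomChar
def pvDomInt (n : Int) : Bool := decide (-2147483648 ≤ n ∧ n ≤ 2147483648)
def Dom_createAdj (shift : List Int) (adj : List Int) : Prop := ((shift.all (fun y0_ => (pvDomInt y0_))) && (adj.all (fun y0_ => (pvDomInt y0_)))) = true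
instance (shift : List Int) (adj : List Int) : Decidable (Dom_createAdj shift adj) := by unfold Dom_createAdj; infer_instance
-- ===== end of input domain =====

-- ===== PORT A =====
-- A: reverse shift, then for each x: if x<0 append []; else append adj[x:len(adj)] and set adj = adj[:x]; reverse res.
-- (A reverses `shift` in place in Python; equivalence here is about the RETURN value only.)
def createAdjGoA : List Int → List Int → List (List Int)
  | [], _ => []
  | x :: xs, adj =>
    if x < 0 then
      [] :: createAdjGoA xs adj
    else
      (PySem.List.slice adj (some x) (some (PySem.List.len adj))) ::
        createAdjGoA xs (PySem.List.slice adj none (some x))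

def createAdj (shift : List Int) (adj : List Int) : List (List Int) :=
  (createAdjGoA shift.reverse adj).reverse

-- ===== PORT B =====
-- B, stage 1: the end-pointer list — ends[i] is the suffix minimum of the
-- non-negative shift entries strictly after i (seeded with len adj); the
-- backward index loop of Source B is this structural recursion (tail first),
-- returning (ends list, final running minimum).
def createAdjEnds (e0 : Int) : List Int → List Int × Int
  | [] => ([], e0)
  | x :: xs =>
    let p := createAdjEnds e0 xs
    (p.2 :: p.1, if 0 ≤ x ∧ x < p.2 then x else p.2)

-- B, stage 2: one slice of the ORIGINAL adj per position (Source B's comprehension).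
def createAdj_alt (shift : List Int) (adj : List Int) : List (List Int) :=
  List.zipWith
    (fun x e => if x < 0 then ([] : List Int) else PySem.List.slice adj (some x) (some e))
    shift (createAdjEnds (PySem.List.len adj) shift).1

-- ===== PRECONDITION & SPEC =====
def Spec_createAdj (shift : List Int) (adj : List Int) (out : List (List Int)) : Prop := out = createAdj_alt shift adj
instance (shift : List Int) (adj : List Int) (out : List (List Int)) : Decidable (Spec_createAdj shift adj out) := by unfold Spec_createAdj; infer_instance

-- ===== CLAIM (what is proved, stated in full; the proofs are below) =====
def Claim_equal_createAdj : Prop := ∀ (shift : List Int) (adj : List Int), Dom_createAdj shift adj → Spec_createAdj shift adj (createAdj shift adj)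

-- ===== LEMMAS AND PROOFS =====
-- Proof-only intermediate program: A's loop with the shrinking working list
-- replaced by an end pointer into the original adj.
def createAdjGoB (adj : List Int) : List Int → Int → List (List Int)
  | [], _ => []
  | x :: xs, e =>
    if x < 0 then
      [] :: createAdjGoB adj xs e
    else
      (PySem.List.slice adj (some x) (some e)) :: createAdjGoB adj xs (min x e)

-- Invariant: A's shrinking working list is always adj.take e.toNat for pointer e.
theorem createAdjGo_eq (adj : List Int) (l : List Int) (e : Int)
    (he0 : 0 ≤ e) (heL : e ≤ adj.length) :
    createAdjGoA l (PySem.List.slice adj none (some e)) = createAdjGoB adj l e := by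
  induction l generalizing e with
  | nil => rfl
  | cons x xs ih =>
    by_cases hx : x < 0
    · simp [createAdjGoA, createAdjGoB, hx, ih e he0 heL]
    · have hx0 : 0 ≤ x := Int.not_lt.mp hx
      simp only [createAdjGoA, createAdjGoB, if_neg hx]
      rw [PySem.List.slice_to adj he0]
      have hlen : (List.take e.toNat adj).length = e.toNat := by simp; omega
      congr 1
      · rw [PySem.List.len_eq, hlen,
          PySem.List.slice_toNat _ hx0 (Int.natCast_nonneg _),
          PySem.List.slice_toNat adj hx0 he0,
          Int.toNat_natCast, List.drop_take, List.take_take]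
        congr 1
        omega
      · rw [PySem.List.slice_to _ hx0, List.take_take]
        have h2 := ih (min x e) (by omega) (by omega)
        rw [PySem.List.slice_to adj (by omega)] at h2
        have hm : (min x e).toNat = min x.toNat e.toNat := by omega
        rw [hm] at h2
        exact h2

theorem createAdjEnds_len (e0 : Int) (l : List Int) :
    (createAdjEnds e0 l).1.length = l.length := by
  induction l with
  | nil => rfl
  | cons x xs ih => simp [createAdjEnds, ih]

theorem createAdjEnds_append (e0 x : Int) (u : List Int) :
    createAdjEnds e0 (u ++ [x]) =
      ((createAdjEnds (if 0 ≤ x ∧ x < e0 then x else e0) u).1 ++ [e0],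
       (createAdjEnds (if 0 ≤ x ∧ x < e0 then x else e0) u).2) := by
  induction u with
  | nil => simp [createAdjEnds]
  | cons y ys ih => simp [createAdjEnds, ih]

-- The pointer program, read back in original order, is exactly B's zip with ends.
theorem goB_reverse (adj : List Int) (l : List Int) (e : Int) :
    (createAdjGoB adj l e).reverse =
      List.zipWith
        (fun x e => if x < 0 then ([] : List Int) else PySem.List.slice adj (some x) (some e))
        l.reverse (createAdjEnds e l.reverse).1 := by
  induction l generalizing e with
  | nil => rfl
  | cons x xs ih =>
    have hupd : ∀ e' : Int, ¬ x < 0 → min x e' = if 0 ≤ x ∧ x < e' then x else e' := by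
      intro e' h; split_ifs with h' <;> omega
    by_cases hx : x < 0
    · simp only [createAdjGoB, if_pos hx, List.reverse_cons, createAdjEnds_append]
      have h0 : ¬ (0 ≤ x ∧ x < e) := by omega
      rw [if_neg h0]
      rw [List.zipWith_append (by simp [createAdjEnds_len])]
      simp [ih, hx]
    · simp only [createAdjGoB, if_neg hx, List.reverse_cons, createAdjEnds_append]
      rw [← hupd e hx]
      rw [List.zipWith_append (by simp [createAdjEnds_len])]
      simp [ih, hx]

-- ===== VERDICT (by name: the statement is the Claim_ definition above) =====
theorem createAdj_spec : Claim_equal_createAdj := by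
  intro shift adj _
  unfold Spec_createAdj createAdj createAdj_alt
  have h := createAdjGo_eq adj shift.reverse (adj.length : Int) (Int.natCast_nonneg _) (le_refl _)
  rw [PySem.List.slice_to adj (Int.natCast_nonneg _)] at h
  simp only [Int.toNat_natCast, List.take_length] at h
  rw [PySem.List.len_eq, h, goB_reverse, List.reverse_reverse]
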